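-- pv_equiv track=rewrite | github.com/rayz1065/competitive-programming | uva/introduction/chess/queen/main.py | compute_ray
-- ===== SOURCE A (Python) =====
-- def in_range (r, c):
--     return 1 <= r <= 8 and 1 <= c <= 8
--
-- def compute_ray (pos, direction, max_dist=8):
--     x, y = pos
--     dx, dy = direction
--     for dist in range(1, max_dist + 1):
--         new_x, new_y = x + dx * dist, y + dy * dist
--         if not in_range(new_x, new_y):
--             break
--         yield new_x, new_y
-- ===== SOURCE B (Python) =====
-- def compute_ray(pos, direction, max_dist=8):
--     x, y = pos
--     dx, dy = direction
--
--     def axis_bound(v, dv):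
--         # largest d with 1 <= v + dv*d <= 8, valid once step d=1 is on board
--         if dv > 0:
--             return (8 - v) // dv
--         if dv < 0:
--             return (v - 1) // (-dv)
--         return max_dist
--
--     if max_dist < 1 or not (1 <= x + dx <= 8 and 1 <= y + dy <= 8):
--         limit = 0
--     else:
--         limit = min(max_dist, axis_bound(x, dx), axis_bound(y, dy))
--     return ((x + dx * d, y + dy * d) for d in range(1, limit + 1))
-- ===== Notes on version B (the rewrite author's own statement) =====
-- stated objective: alternative
-- what changed: B computes the ray length in closed form (a floor-division bound per axis, clamped by max_dist, zero if the first step is off the board) and maps over range(1, limit+1), instead of A's per-cell loop with an in_range test and break.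
import Mathlib
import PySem

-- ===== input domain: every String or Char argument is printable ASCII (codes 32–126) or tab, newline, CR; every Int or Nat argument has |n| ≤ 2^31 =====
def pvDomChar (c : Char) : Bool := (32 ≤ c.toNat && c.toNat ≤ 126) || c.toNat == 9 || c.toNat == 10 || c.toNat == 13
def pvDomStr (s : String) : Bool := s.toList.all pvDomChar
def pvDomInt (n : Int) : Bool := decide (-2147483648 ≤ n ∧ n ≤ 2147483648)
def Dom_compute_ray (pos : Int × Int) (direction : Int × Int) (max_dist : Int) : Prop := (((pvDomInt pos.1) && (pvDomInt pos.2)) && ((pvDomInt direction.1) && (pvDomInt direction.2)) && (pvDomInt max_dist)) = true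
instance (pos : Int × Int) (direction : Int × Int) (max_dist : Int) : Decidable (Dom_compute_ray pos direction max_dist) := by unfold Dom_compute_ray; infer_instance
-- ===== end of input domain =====

-- B replaces A's per-cell loop-and-break with an analytically computed ray length
-- (floor-division bound per axis), then maps over the range; objective: alternative.
-- A is a Python generator; equivalence is about the list of yielded cells.

-- ===== PORT A =====
def pyInRange (r c : Int) : Bool :=
  (decide (1 ≤ r) && decide (r ≤ 8)) && (decide (1 ≤ c) && decide (c ≤ 8))

-- the for-loop over range(1, max_dist+1) with break: fuel = remaining iterations, d = current dist
def computeRayLoop (x y dx dy : Int) : Nat → Int → List (Int × Int)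
  | 0, _ => []
  | n + 1, d =>
    let nx := x + dx * d
    let ny := y + dy * d
    if pyInRange nx ny then (nx, ny) :: computeRayLoop x y dx dy n (d + 1) else []

def compute_ray (pos : Int × Int) (direction : Int × Int) (max_dist : Int) : List (Int × Int) :=
  computeRayLoop pos.1 pos.2 direction.1 direction.2 max_dist.toNat 1

-- ===== PORT B =====
-- largest d with 1 ≤ v + dv*d ≤ 8, valid once the step d = 1 is on the board
def axisBound (v dv md : Int) : Int :=
  if 0 < dv then PySem.Int.floordiv (8 - v) dv
  else if dv < 0 then PySem.Int.floordiv (v - 1) (-dv)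
  else md

def compute_ray_alt (pos : Int × Int) (direction : Int × Int) (max_dist : Int) : List (Int × Int) :=
  let x := pos.1
  let y := pos.2
  let dx := direction.1
  let dy := direction.2
  let limit : Int :=
    if max_dist < 1 ∨ ¬(1 ≤ x + dx ∧ x + dx ≤ 8 ∧ 1 ≤ y + dy ∧ y + dy ≤ 8) then 0
    else min (min max_dist (axisBound x dx max_dist)) (axisBound y dy max_dist)
  (PySem.List.pyRange 1 (limit + 1) 1).map (fun d => (x + dx * d, y + dy * d))

-- ===== PRECONDITION & SPEC =====
def Spec_compute_ray (pos : Int × Int) (direction : Int × Int) (max_dist : Int) (out : List (Int × Int)) : Prop := out = compute_ray_alt pos direction max_dist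
instance (pos : Int × Int) (direction : Int × Int) (max_dist : Int) (out : List (Int × Int)) : Decidable (Spec_compute_ray pos direction max_dist out) := by unfold Spec_compute_ray; infer_instance

-- ===== CLAIM (what is proved, stated in full; the proofs are below) =====
def Claim_equal_compute_ray : Prop := ∀ (pos : Int × Int) (direction : Int × Int) (max_dist : Int), Dom_compute_ray pos direction max_dist → Spec_compute_ray pos direction max_dist (compute_ray pos direction max_dist)

-- ===== LEMMAS AND PROOFS =====

theorem pyInRange_iff (r c : Int) :
    pyInRange r c = true ↔ (1 ≤ r ∧ r ≤ 8 ∧ 1 ≤ c ∧ c ≤ 8) := by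
  simp [pyInRange]; tauto

-- the break-loop over [a, a+n) is the map over [a, L+1) when P holds up to L and fails at L+1
theorem loop_cons_true (x y dx dy a : Int) (n : Nat)
    (h : pyInRange (x + dx * a) (y + dy * a) = true) :
    computeRayLoop x y dx dy (n + 1) a = (x + dx * a, y + dy * a) :: computeRayLoop x y dx dy n (a + 1) := by
  simp only [computeRayLoop, h, if_pos]

theorem loop_cons_false (x y dx dy a : Int) (n : Nat)
    (h : pyInRange (x + dx * a) (y + dy * a) = false) :
    computeRayLoop x y dx dy (n + 1) a = [] := by
  simp only [computeRayLoop, h, Bool.false_eq_true, if_false]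

theorem loop_eq_map (x y dx dy : Int) (L : Int) :
    ∀ (n : Nat) (a : Int), a ≤ L + 1 →
    (∀ d, a ≤ d → d ≤ L → pyInRange (x + dx * d) (y + dy * d) = true) →
    (L + 1 < a + n → pyInRange (x + dx * (L + 1)) (y + dy * (L + 1)) = false) →
    L < a + n →
    computeRayLoop x y dx dy n a =
      (PySem.List.pyRange a (L + 1) 1).map (fun d => (x + dx * d, y + dy * d)) := by
  intro n
  induction n with
  | zero =>
    intro a ha _ _ hLn
    rw [PySem.List.pyRange_one_eq_nil (by omega)]
    rfl
  | succ n ih =>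
    intro a ha hTrue hFalse hLn
    have hn1 : (((n : Nat) + 1 : Nat) : Int) = (n : Int) + 1 := by push_cast; ring
    rw [hn1] at hFalse hLn
    by_cases h : a ≤ L
    · have hPa := hTrue a le_rfl h
      rw [loop_cons_true _ _ _ _ _ _ hPa]
      rw [PySem.List.pyRange_one_cons (show a < L + 1 by omega), List.map_cons]
      congr 1
      exact ih (a + 1) (by omega) (fun d h1 h2 => hTrue d (by omega) h2)
        (fun hh => hFalse (by omega)) (by omega)
    · have haL : a = L + 1 := by omega
      have hPa : pyInRange (x + dx * a) (y + dy * a) = false := by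
        rw [haL]; exact hFalse (by omega)
      rw [loop_cons_false _ _ _ _ _ _ hPa, PySem.List.pyRange_one_eq_nil (by omega)]
      rfl

theorem axisBound_in (v dv md d : Int) (h1 : 1 ≤ v + dv) (h8 : v + dv ≤ 8)
    (hd : 1 ≤ d) (hb : d ≤ axisBound v dv md) : 1 ≤ v + dv * d ∧ v + dv * d ≤ 8 := by
  unfold axisBound at hb
  split_ifs at hb with hp hn
  · rw [PySem.Int.le_floordiv_iff_mul_le hp] at hb
    constructor <;> nlinarith
  · rw [PySem.Int.le_floordiv_iff_mul_le (by omega)] at hb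
    constructor <;> nlinarith
  · have : dv = 0 := by omega
    subst this; simp at *; omega

theorem axisBound_out (v dv md d : Int) (hdv : dv ≠ 0)
    (_hd : 1 ≤ d) (hb : axisBound v dv md < d) : ¬(1 ≤ v + dv * d ∧ v + dv * d ≤ 8) := by
  unfold axisBound at hb
  split_ifs at hb with hp hn
  · rw [PySem.Int.floordiv_lt_iff_lt_mul hp] at hb
    intro ⟨_, h⟩; nlinarith
  · rw [PySem.Int.floordiv_lt_iff_lt_mul (by omega)] at hb
    intro ⟨h, _⟩; nlinarith
  · omega

theorem axisBound_ge_one (v dv md : Int) (h1 : 1 ≤ v + dv) (h8 : v + dv ≤ 8)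
    (hmd : 1 ≤ md) : 1 ≤ axisBound v dv md := by
  unfold axisBound
  split_ifs with hp hn
  · rw [PySem.Int.le_floordiv_iff_mul_le hp]; nlinarith
  · rw [PySem.Int.le_floordiv_iff_mul_le (by omega)]; nlinarith
  · exact hmd

-- ===== VERDICT (by name: the statement is the Claim_ definition above) =====
theorem compute_ray_spec : Claim_equal_compute_ray := by
  intro pos direction max_dist _
  obtain ⟨x, y⟩ := pos
  obtain ⟨dx, dy⟩ := direction
  unfold Spec_compute_ray compute_ray compute_ray_alt
  simp only
  by_cases hmd : max_dist < 1
  · rw [if_pos (Or.inl hmd)]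
    rw [show max_dist.toNat = 0 by omega, PySem.List.pyRange_one_eq_nil (by omega)]
    rfl
  · have hmd1 : 1 ≤ max_dist := by omega
    by_cases hin : 1 ≤ x + dx ∧ x + dx ≤ 8 ∧ 1 ≤ y + dy ∧ y + dy ≤ 8
    · rw [if_neg (by tauto)]
      obtain ⟨hx1, hx8, hy1, hy8⟩ := hin
      set L : Int := min (min max_dist (axisBound x dx max_dist)) (axisBound y dy max_dist) with hL
      have hax : 1 ≤ axisBound x dx max_dist := axisBound_ge_one x dx max_dist hx1 hx8 hmd1
      have hay : 1 ≤ axisBound y dy max_dist := axisBound_ge_one y dy max_dist hy1 hy8 hmd1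
      have hL1 : 1 ≤ L := by simp [hL]; omega
      have hLmd : L ≤ max_dist := by simp [hL]
      apply loop_eq_map x y dx dy L max_dist.toNat 1 (by omega)
      · intro d hd1 hdL
        rw [pyInRange_iff]
        have hdx := axisBound_in x dx max_dist d hx1 hx8 hd1 (by simp [hL] at hdL; omega)
        have hdy := axisBound_in y dy max_dist d hy1 hy8 hd1 (by simp [hL] at hdL; omega)
        tauto
      · intro hlt
        have hLlt : L < max_dist := by omega
        rw [← Bool.not_eq_true, pyInRange_iff]
        rcases le_total (axisBound y dy max_dist) (min max_dist (axisBound x dx max_dist)) with hc | hc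
        · have hLy : L = axisBound y dy max_dist := by simp [hL]; omega
          have hdy0 : dy ≠ 0 := by
            intro h; rw [h] at hLy; simp [axisBound] at hLy; omega
          have := axisBound_out y dy max_dist (L + 1) hdy0 (by omega) (by omega)
          tauto
        · have hLx : L = axisBound x dx max_dist := by
            simp [hL]
            rcases le_total max_dist (axisBound x dx max_dist) with h | h <;> simp [min_def] at * <;> omega
          have hdx0 : dx ≠ 0 := by
            intro h; rw [h] at hLx; simp [axisBound] at hLx; omega
          have := axisBound_out x dx max_dist (L + 1) hdx0 (by omega) (by omega)
          tauto
      · omega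
    · rw [if_pos (Or.inr hin)]
      apply loop_eq_map x y dx dy 0 max_dist.toNat 1 (by omega)
      · intro d hd1 hd0; omega
      · intro _
        rw [← Bool.not_eq_true, pyInRange_iff]
        simpa using hin
      · omega
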